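-- pv_equiv track=rewrite | github.com/HyunWoo9930/CodingTest-Study-Python | Programmers/2020 KAKAO BLIND RECRUITMENT/문자열 압축.py | split_represent
-- ===== SOURCE A (Python) =====
-- def split_represent(s, n):
--     stack = []
--     split_string = split(s, n)
--     for i in split_string:
--         if i == '':
--             continue
--         if len(stack) == 0:
--             stack.append([1, i])
--         else:
--             prev = stack.pop()
--             if prev[1] == i:
--                 prev[0] = prev[0] + 1
--                 stack.append(prev)
--             else :
--                 stack.append(prev)
--                 stack.append([1, i])
--
--     count = 0
--     for i in stack:
--         if i[0] != 1:
--             count += len(str(i[0]))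
--         count += len(i[1])
--
--     return count
--
-- def split(s, n):
--     split_string = []
--     prev = 0
--     for i in range(n, len(s) + 1, n):
--         split_string.append(s[prev:i])
--         prev = i
--
--     split_string.append(s[prev:])
--     return split_string
-- ===== SOURCE B (Python) =====
-- def split_represent(s, n):
--     total = 0
--     prev = None
--     count = 0
--     for i in range(0, len(s), n):
--         chunk = s[i:i + n]
--         if chunk == prev:
--             count += 1
--         else:
--             if prev is not None:
--                 total += len(prev) + (len(str(count)) if count != 1 else 0)
--             prev = chunk
--             count = 1
--     if prev is not None:
--         total += len(prev) + (len(str(count)) if count != 1 else 0)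
--     return total
-- ===== Notes on version B (the rewrite author's own statement) =====
-- stated objective: simpler
-- what changed: A builds the chunk list with a helper, folds it into a stack of [count, chunk] run pairs with pop/push, and then sums the stack in a second loop; B fuses everything into one pass over the chunk starts that keeps only (previous chunk, run length, running total) and adds each run's contribution as soon as it closes.
-- outside the precondition, e.g. on split_represent('ab', -1): A returns 2, B returns 0; on split_represent('ab', 0): A raises ValueError, B raises ValueError
import Mathlib
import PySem

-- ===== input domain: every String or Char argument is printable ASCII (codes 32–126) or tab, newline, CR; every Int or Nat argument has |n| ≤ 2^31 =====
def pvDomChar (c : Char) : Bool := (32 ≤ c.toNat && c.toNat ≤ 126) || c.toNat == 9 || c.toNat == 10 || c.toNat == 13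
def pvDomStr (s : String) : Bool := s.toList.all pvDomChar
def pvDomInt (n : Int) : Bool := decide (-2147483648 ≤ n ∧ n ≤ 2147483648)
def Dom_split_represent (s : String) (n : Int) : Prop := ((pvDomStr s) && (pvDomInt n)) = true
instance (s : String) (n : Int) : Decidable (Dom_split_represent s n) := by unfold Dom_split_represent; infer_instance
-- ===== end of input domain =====

-- B replaces A's three passes (build chunk list, fold it into a stack of [count, chunk] runs,
-- sum the stack) by a single fused pass over the chunk starts that accumulates the compressed
-- length directly; equivalence of the return values is proved for every chunk size n ≥ 1.

-- ===== PORT A =====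
-- helper `split(s, n)`: fold over range(n, len(s)+1, n) carrying (pieces, prev), then append s[prev:]
def splitStep (s : String) (st : List String × Int) (i : Int) : List String × Int :=
  (st.1 ++ [PySem.Str.slice s (some st.2) (some i)], i)

def pySplit (s : String) (n : Int) : List String :=
  let st := (PySem.List.pyRange n (PySem.Str.len s + 1) n).foldl (splitStep s) ([], 0)
  st.1 ++ [PySem.Str.slice s (some st.2) none]

-- one iteration of A's stack loop (pop = getLast?, push = append at the end)
def stackStep (stack : List (Int × String)) (x : String) : List (Int × String) :=
  if x = "" then stack
  else if stack.length = 0 then stack ++ [((1 : Int), x)]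
  else
    let rest := stack.dropLast
    match stack.getLast? with
    | none => rest ++ [((1 : Int), x)]   -- unreachable: stack is nonempty here
    | some prev =>
      if prev.2 = x then rest ++ [(prev.1 + 1, x)]
      else rest ++ [prev] ++ [((1 : Int), x)]

def split_represent (s : String) (n : Int) : Int :=
  let stack := (pySplit s n).foldl stackStep []
  stack.foldl
    (fun c p => (if p.1 ≠ 1 then c + PySem.Str.len (PySem.Int.toStr p.1) else c) + PySem.Str.len p.2)
    0

-- ===== PORT B =====
-- flush the pending run (prev, count) into the running total (the `if prev is not None` block)
def flushB (t : Int) (prev : Option String) (c : Int) : Int :=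
  match prev with
  | none => t
  | some p => t + (PySem.Str.len p + (if c ≠ 1 then PySem.Str.len (PySem.Int.toStr c) else 0))

def chunkStep (s : String) (n : Int) (st : Int × Option String × Int) (i : Int) :
    Int × Option String × Int :=
  let chunk := PySem.Str.slice s (some i) (some (i + n))
  if some chunk = st.2.1 then (st.1, st.2.1, st.2.2 + 1)
  else (flushB st.1 st.2.1 st.2.2, some chunk, 1)

def split_represent_alt (s : String) (n : Int) : Int :=
  let st := (PySem.List.pyRange 0 (PySem.Str.len s) n).foldl (chunkStep s n) (0, none, 0)
  flushB st.1 st.2.1 st.2.2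

-- ===== PRECONDITION & SPEC =====
-- Pre_ excludes n ≤ 0, outside the natural domain of a chunk size: at n = 0 A raises
-- ValueError (range step 0), and for n < 0 A's value len(s) is an accident of the negative-step
-- range being empty (B returns 0 there).
def Pre_split_represent (s : String) (n : Int) : Prop := 1 ≤ n
instance (s : String) (n : Int) : Decidable (Pre_split_represent s n) := by
  unfold Pre_split_represent; infer_instance

def pvWitness_split_represent : String × Int := ("aabbaccc", 2)

def Spec_split_represent (s : String) (n : Int) (out : Int) : Prop := out = split_represent_alt s n
instance (s : String) (n : Int) (out : Int) : Decidable (Spec_split_represent s n out) := by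
  unfold Spec_split_represent; infer_instance

-- ===== CLAIM (what is proved, stated in full; the proofs are below) =====
def Claim_equal_split_represent : Prop :=
  ∀ (s : String) (n : Int), Dom_split_represent s n → Pre_split_represent s n →
    Spec_split_represent s n (split_represent s n)

-- ===== LEMMAS AND PROOFS =====

-- range(a, b, n) with positive step n: nil and cons forms
lemma pyRange_pos_nil (a b n : Int) (hn : 0 < n) (h : b ≤ a) : PySem.List.pyRange a b n = [] := by
  rw [PySem.List.pyRange_of_pos a b hn]
  simp [show ¬ a < b by omega]

lemma pyRange_pos_cons (a b n : Int) (hn : 0 < n) (h : a < b) :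
    PySem.List.pyRange a b n = a :: PySem.List.pyRange (a + n) b n := by
  rw [PySem.List.pyRange_of_pos a b hn, PySem.List.pyRange_of_pos (a + n) b hn]
  have key : ((b - a + n - 1) / n).toNat
      = (if a + n < b then ((b - (a + n) + n - 1) / n).toNat else 0) + 1 := by
    split_ifs with hab
    · have h1 : (b - a + n - 1) / n = (b - a - 1) / n + 1 := by
        have := Int.add_mul_ediv_right (b - a - 1) 1 (show n ≠ 0 by omega)
        simp only [one_mul] at this
        rw [show b - a + n - 1 = b - a - 1 + n by ring, this]
      have h2 : 0 ≤ (b - a - 1) / n := Int.ediv_nonneg (by omega) (by omega)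
      rw [show b - (a + n) + n - 1 = b - a - 1 by ring, h1]
      omega
    · have h1 : (b - a + n - 1) / n = (b - a - 1) / n + 1 := by
        have := Int.add_mul_ediv_right (b - a - 1) 1 (show n ≠ 0 by omega)
        simp only [one_mul] at this
        rw [show b - a + n - 1 = b - a - 1 + n by ring, this]
      have h2 : (b - a - 1) / n = 0 := Int.ediv_eq_zero_of_lt (by omega) (by omega)
      omega
  rw [if_pos h, key, List.range_succ_eq_map]
  simp only [List.map_cons, List.map_map]
  refine List.cons_eq_cons.mpr ⟨by simp, ?_⟩
  apply List.map_congr_left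
  intro k _
  simp only [Function.comp_apply]
  push_cast
  ring

-- a chunk that starts strictly inside the string is nonempty
lemma chunk_ne_empty (s : String) (n i : Int) (hn : 0 < n) (h0 : 0 ≤ i)
    (hi : i < (s.toList.length : Int)) :
    PySem.Str.slice s (some i) (some (i + n)) ≠ "" := by
  intro h
  have hlen := congrArg (fun t => t.toList.length) h
  simp only [PySem.Str.toList_slice, PySem.Chars.slice_eq_listSlice] at hlen
  rw [PySem.List.length_slice] at hlen
  simp only [PySem.List.clampIdx] at hlen
  rw [if_neg (by omega), if_neg (by omega)] at hlen
  simp only [String.toList_empty, List.length_nil] at hlen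
  omega

-- the final piece s[prev:] coincides with the chunk s[prev:prev+n] when prev+n reaches the end
lemma tail_chunk_eq (s : String) (n a : Int) (h0 : 0 ≤ a) (ha : a ≤ (s.toList.length : Int))
    (hend : (s.toList.length : Int) ≤ a + n) :
    PySem.Str.slice s (some a) none = PySem.Str.slice s (some a) (some (a + n)) := by
  rw [← String.toList_inj]
  simp only [PySem.Str.toList_slice, PySem.Chars.slice_eq_listSlice]
  rw [PySem.List.slice_from _ h0, PySem.List.slice_toNat _ h0 (by omega)]
  rw [List.take_of_length_le (by rw [List.length_drop]; omega)]

lemma tail_empty (s : String) (a : Int) (h0 : 0 ≤ a) (ha : (s.toList.length : Int) ≤ a) :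
    PySem.Str.slice s (some a) none = "" := by
  rw [← String.toList_inj]
  simp only [PySem.Str.toList_slice, PySem.Chars.slice_eq_listSlice]
  rw [PySem.List.slice_from _ h0]
  simp only [String.toList_empty]
  exact List.drop_eq_nil_of_le (by omega)

-- A's split loop, characterised: the nonempty pieces it builds from offset a are exactly
-- B's chunks s[i:i+n] for i in range(a, len(s), n)
lemma split_loop (s : String) (n : Int) (hn : 0 < n) :
    ∀ (m : Nat) (a : Int) (acc : List String), 0 ≤ a → a ≤ (s.toList.length : Int) →
      ((s.toList.length : Int) - a).toNat ≤ m →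
      (((PySem.List.pyRange (a + n) ((s.toList.length : Int) + 1) n).foldl (splitStep s) (acc, a)).1
          ++ [PySem.Str.slice s
              (some ((PySem.List.pyRange (a + n) ((s.toList.length : Int) + 1) n).foldl
                (splitStep s) (acc, a)).2) none]).filter (fun x => x ≠ "")
      = acc.filter (fun x => x ≠ "")
        ++ (PySem.List.pyRange a (s.toList.length : Int) n).map
            (fun i => PySem.Str.slice s (some i) (some (i + n))) := by
  intro m
  induction m with
  | zero =>
    intro a acc h0 ha hm
    rw [pyRange_pos_nil (a + n) _ n hn (by omega), pyRange_pos_nil a _ n hn (by omega)]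
    simp only [List.foldl_nil, List.map_nil, List.append_nil]
    rw [List.filter_append, tail_empty s a h0 (by omega)]
    simp
  | succ m ih =>
    intro a acc h0 ha hm
    by_cases hstep : a + n ≤ (s.toList.length : Int)
    · have hlt : a < (s.toList.length : Int) := by omega
      rw [pyRange_pos_cons (a + n) _ n hn (by omega), pyRange_pos_cons a _ n hn hlt]
      simp only [List.foldl_cons]
      rw [show splitStep s (acc, a) (a + n)
            = (acc ++ [PySem.Str.slice s (some a) (some (a + n))], a + n) from rfl]
      rw [ih (a + n) (acc ++ [PySem.Str.slice s (some a) (some (a + n))]) (by omega) hstep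
            (by omega)]
      rw [List.filter_append]
      have hch := chunk_ne_empty s n a hn h0 hlt
      simp [hch]
    · rw [pyRange_pos_nil (a + n) _ n hn (by omega)]
      simp only [List.foldl_nil]
      by_cases haL : a < (s.toList.length : Int)
      · rw [pyRange_pos_cons a _ n hn haL, pyRange_pos_nil (a + n) _ n hn (by omega)]
        rw [tail_chunk_eq s n a h0 ha (by omega), List.filter_append]
        have hch := chunk_ne_empty s n a hn h0 haL
        simp [hch]
      · rw [pyRange_pos_nil a _ n hn (by omega)]
        rw [List.filter_append, tail_empty s a h0 (by omega)]
        simp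

-- the stack loop ignores empty pieces
lemma foldl_stack_filter (cs : List String) :
    ∀ st, cs.foldl stackStep st = (cs.filter (fun x => x ≠ "")).foldl stackStep st := by
  induction cs with
  | nil => intro st; rfl
  | cons x xs ih =>
    intro st
    by_cases hx : x = ""
    · subst hx
      simp only [List.foldl_cons, List.filter_cons]
      rw [show stackStep st "" = st from by simp [stackStep]]
      simpa using ih st
    · simp only [List.foldl_cons, List.filter_cons]
      rw [if_pos (by simpa using hx)]
      simpa using ih (stackStep st x)

-- the contribution of one stack entry to A's final sum
def cost (p : Int × String) : Int :=
  (if p.1 ≠ 1 then PySem.Str.len (PySem.Int.toStr p.1) else 0) + PySem.Str.len p.2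

lemma score_eq (st : List (Int × String)) (t : Int) :
    st.foldl
      (fun c p => (if p.1 ≠ 1 then c + PySem.Str.len (PySem.Int.toStr p.1) else c)
        + PySem.Str.len p.2) t
    = t + (st.map cost).sum := by
  have hfun : (fun (c : Int) (p : Int × String) =>
      (if p.1 ≠ 1 then c + PySem.Str.len (PySem.Int.toStr p.1) else c) + PySem.Str.len p.2)
      = fun c p => c + cost p := by
    funext c p
    simp only [cost]
    split_ifs <;> ring
  rw [hfun, PySem.List.foldl_add]

-- B's loop body, on the chunk itself
def bstep (st : Int × Option String × Int) (x : String) : Int × Option String × Int :=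
  if some x = st.2.1 then (st.1, st.2.1, st.2.2 + 1)
  else (flushB st.1 st.2.1 st.2.2, some x, 1)

-- B's loop with a pending run, written as a recursion over the chunk list
def bgo (t : Int) (p : String) (c : Int) : List String → Int
  | [] => flushB t (some p) c
  | x :: xs => if x = p then bgo t p (c + 1) xs else bgo (flushB t (some p) c) x 1 xs

lemma bfold (cs : List String) : ∀ (t : Int) (p : String) (c : Int),
    flushB (cs.foldl bstep (t, some p, c)).1 (cs.foldl bstep (t, some p, c)).2.1
        (cs.foldl bstep (t, some p, c)).2.2
      = bgo t p c cs := by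
  induction cs with
  | nil => intro t p c; rfl
  | cons x xs ih =>
    intro t p c
    simp only [List.foldl_cons, bgo]
    by_cases hxp : x = p
    · rw [if_pos hxp, show bstep (t, some p, c) x = (t, some p, c + 1) from by
        simp [bstep, hxp]]
      exact ih t p (c + 1)
    · rw [if_neg hxp, show bstep (t, some p, c) x = (flushB t (some p) c, some x, 1) from by
        simp [bstep, hxp]]
      exact ih (flushB t (some p) c) x 1

lemma bgo_add (cs : List String) : ∀ (t : Int) (p : String) (c : Int),
    bgo t p c cs = t + bgo 0 p c cs := by
  induction cs with
  | nil => intro t p c; simp only [bgo, flushB]; ring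
  | cons x xs ih =>
    intro t p c
    by_cases hxp : x = p
    · simp only [bgo, if_pos hxp]
      rw [ih t, ih 0]
    · simp only [bgo, if_neg hxp]
      rw [ih (flushB t (some p) c), ih (flushB 0 (some p) c)]
      simp only [flushB]
      ring

-- core invariant: A's stack loop over nonempty chunks, then summed, is B's fused loop
lemma stack_core (cs : List String) : ∀ (st : List (Int × String)) (c : Int) (p : String),
    (∀ x ∈ cs, x ≠ "") →
    ((cs.foldl stackStep (st ++ [(c, p)])).map cost).sum
      = (st.map cost).sum + bgo 0 p c cs := by
  induction cs with
  | nil =>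
    intro st c p _
    simp only [List.foldl_nil, List.map_append, List.sum_append, bgo, cost, flushB,
      List.map_cons, List.map_nil, List.sum_cons, List.sum_nil]
    ring
  | cons x xs ih =>
    intro st c p hne
    have hx : x ≠ "" := hne x (by simp)
    have hxs : ∀ y ∈ xs, y ≠ "" := fun y hy => hne y (by simp [hy])
    simp only [List.foldl_cons]
    have hstep : stackStep (st ++ [(c, p)]) x
        = if p = x then st ++ [(c + 1, x)] else (st ++ [(c, p)]) ++ [((1 : Int), x)] := by
      simp only [stackStep, if_neg hx]
      rw [if_neg (by simp)]
      simp only [List.getLast?_concat, List.dropLast_concat]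
    rw [hstep]
    by_cases hpx : p = x
    · rw [if_pos hpx, ih st (c + 1) x hxs]
      subst hpx
      simp [bgo]
    · rw [if_neg hpx, ih (st ++ [(c, p)]) 1 x hxs]
      simp only [bgo, if_neg (fun h : x = p => hpx h.symm)]
      rw [bgo_add xs (flushB 0 (some p) c)]
      simp only [List.map_append, List.sum_append, cost, flushB,
        List.map_cons, List.map_nil, List.sum_cons, List.sum_nil]
      ring

-- ===== VERDICT (by name: the statement is the Claim_ definition above) =====
theorem split_represent_spec : Claim_equal_split_represent := by
  intro s n _ hpre
  have hn : 0 < n := hpre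
  unfold Spec_split_represent split_represent split_represent_alt pySplit
  have main := split_loop s n hn s.toList.length 0 [] le_rfl (by positivity) (by omega)
  simp only [List.filter_nil, List.nil_append, zero_add] at main
  rw [← PySem.Str.len_eq] at main
  have hB : ∀ init, (PySem.List.pyRange 0 (PySem.Str.len s) n).foldl (chunkStep s n) init
      = ((PySem.List.pyRange 0 (PySem.Str.len s) n).map
          (fun i => PySem.Str.slice s (some i) (some (i + n)))).foldl bstep init := by
    intro init
    rw [List.foldl_map]
    rfl
  rw [foldl_stack_filter, main, hB (0, none, 0)]
  cases hcase : (PySem.List.pyRange 0 (PySem.Str.len s) n).map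
      (fun i => PySem.Str.slice s (some i) (some (i + n))) with
  | nil => rfl
  | cons x xs =>
    have hne : ∀ y ∈ x :: xs, y ≠ "" := by
      rw [← hcase]
      intro y hy
      obtain ⟨i, hi, rfl⟩ := List.mem_map.mp hy
      have hmem := (PySem.List.mem_pyRange_iff_of_pos hn i).mp hi
      have hi2 := hmem.2.1
      rw [PySem.Str.len_eq] at hi2
      exact chunk_ne_empty s n i hn hmem.1 hi2
    have hx : x ≠ "" := hne x (by simp)
    simp only [List.foldl_cons]
    rw [show stackStep [] x = [] ++ [((1 : Int), x)] from by simp [stackStep, hx]]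
    rw [score_eq]
    rw [stack_core xs [] 1 x (fun y hy => hne y (by simp [hy]))]
    rw [show bstep (0, none, 0) x = (0, some x, 1) from by simp [bstep, flushB]]
    rw [bfold xs 0 x 1]
    simp
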